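-- pv_equiv track=rewrite | github.com/Alpus/openclaw | skills/gym/gym/scripts/gym_analytics.py | normalize_match
-- ===== SOURCE A (Python) =====
-- def normalize_match(name, target):
--     nl, tl = name.lower(), target.lower()
--     # "Squat (lighter)" should NOT match plain "Squat" — they're separate exercises
--     if "lighter" in nl and "lighter" not in tl:
--         return False
--     if "lighter" in tl and "lighter" not in nl:
--         return False
--     if nl == tl or tl in nl or nl in tl:
--         return True
--     aliases = {
--         "bench press": ["bench", "flat bench", "incline bench", "decline bench press"],
--         "squat": ["barbell squat", "barbell back squat", "back squat"],
--         "ohp": ["overhead press", "standing press", "military press"],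
--         "seated cable row": ["seated row", "cable row"],
--         "barbell row": ["bent over row", "pendlay row"],
--     }
--     for canonical, names in aliases.items():
--         all_names = [canonical] + names
--         if tl in all_names and nl in all_names:
--             return True
--     return False
-- ===== SOURCE B (Python) =====
-- # Prebuilt reverse index: each exercise name (canonical or alias) -> its canonical group key.
-- _GROUP = {
--     "bench press": "bench press",
--     "bench": "bench press",
--     "flat bench": "bench press",
--     "incline bench": "bench press",
--     "decline bench press": "bench press",
--     "squat": "squat",
--     "barbell squat": "squat",
--     "barbell back squat": "squat",
--     "back squat": "squat",
--     "ohp": "ohp",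
--     "overhead press": "ohp",
--     "standing press": "ohp",
--     "military press": "ohp",
--     "seated cable row": "seated cable row",
--     "seated row": "seated cable row",
--     "cable row": "seated cable row",
--     "barbell row": "barbell row",
--     "bent over row": "barbell row",
--     "pendlay row": "barbell row",
-- }
--
--
-- def normalize_match(name, target):
--     nl, tl = name.lower(), target.lower()
--     # "(lighter)" variants only ever match other "(lighter)" variants
--     return (("lighter" in nl) == ("lighter" in tl)) and (
--         nl == tl or tl in nl or nl in tl
--         or (nl in _GROUP and _GROUP[nl] == _GROUP.get(tl))
--     )
-- ===== Notes on version B (the rewrite author's own statement) =====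
-- stated objective: simpler
-- what changed: A's per-call loop over the alias dict (scanning each [canonical]+names list for both strings) is replaced by a flat reverse-index dict written once at module level mapping every name to its canonical group; the function is a single boolean expression: the two symmetric 'lighter' guards collapse into one equality test and alias resolution is two O(1) lookups compared for equality (guarding that nl is actually indexed so two unindexed names do not match via None==None).
import Mathlib
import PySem

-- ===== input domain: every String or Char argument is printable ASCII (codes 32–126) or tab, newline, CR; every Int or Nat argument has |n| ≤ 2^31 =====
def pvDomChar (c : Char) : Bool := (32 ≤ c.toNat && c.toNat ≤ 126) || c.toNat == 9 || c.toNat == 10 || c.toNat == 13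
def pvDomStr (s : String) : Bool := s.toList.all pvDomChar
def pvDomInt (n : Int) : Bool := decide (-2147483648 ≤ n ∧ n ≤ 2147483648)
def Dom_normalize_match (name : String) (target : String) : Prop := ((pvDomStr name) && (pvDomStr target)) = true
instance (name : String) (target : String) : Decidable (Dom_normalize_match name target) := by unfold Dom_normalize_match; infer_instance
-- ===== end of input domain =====

-- B replaces A's per-group alias scan with a flat prebuilt reverse-index dict (name -> canonical group) and a single boolean expression; simpler, same result.


-- ===== PORT A =====
-- the literal alias dict of A (a dict iterated in insertion order)
def pvAliasesA : List (String × List String) :=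
  [("bench press", ["bench", "flat bench", "incline bench", "decline bench press"]),
   ("squat", ["barbell squat", "barbell back squat", "back squat"]),
   ("ohp", ["overhead press", "standing press", "military press"]),
   ("seated cable row", ["seated row", "cable row"]),
   ("barbell row", ["bent over row", "pendlay row"])]

def normalize_match (name : String) (target : String) : Bool :=
  let nl := PySem.Str.lower name
  let tl := PySem.Str.lower target
  if PySem.Str.isIn "lighter" nl && !(PySem.Str.isIn "lighter" tl) then false
  else if PySem.Str.isIn "lighter" tl && !(PySem.Str.isIn "lighter" nl) then false
  else if nl == tl || PySem.Str.isIn tl nl || PySem.Str.isIn nl tl then true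
  else
    -- for canonical, names in aliases.items(): if tl in all_names and nl in all_names: return True
    pvAliasesA.any (fun p =>
      let all_names := p.1 :: p.2
      all_names.contains tl && all_names.contains nl)

-- ===== PORT B =====
-- B's module-level flat reverse index _GROUP, written as a literal dict
def pvGroup : PySem.Dict String String := PySem.Dict.mk
  [("bench press", "bench press"), ("bench", "bench press"), ("flat bench", "bench press"),
   ("incline bench", "bench press"), ("decline bench press", "bench press"),
   ("squat", "squat"), ("barbell squat", "squat"), ("barbell back squat", "squat"), ("back squat", "squat"),
   ("ohp", "ohp"), ("overhead press", "ohp"), ("standing press", "ohp"), ("military press", "ohp"),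
   ("seated cable row", "seated cable row"), ("seated row", "seated cable row"), ("cable row", "seated cable row"),
   ("barbell row", "barbell row"), ("bent over row", "barbell row"), ("pendlay row", "barbell row")]

def normalize_match_alt (name : String) (target : String) : Bool :=
  let nl := PySem.Str.lower name
  let tl := PySem.Str.lower target
  (PySem.Str.isIn "lighter" nl == PySem.Str.isIn "lighter" tl)
  && (nl == tl || PySem.Str.isIn tl nl || PySem.Str.isIn nl tl
      || (pvGroup.contains nl && (pvGroup.get? nl == pvGroup.get? tl)))

-- ===== PRECONDITION & SPEC =====
def Spec_normalize_match (name : String) (target : String) (out : Bool) : Prop := out = normalize_match_alt name target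
instance (name : String) (target : String) (out : Bool) : Decidable (Spec_normalize_match name target out) := by unfold Spec_normalize_match; infer_instance

-- ===== CLAIM (what is proved, stated in full; the proofs are below) =====
def Claim_equal_normalize_match : Prop := ∀ (name : String) (target : String), Dom_normalize_match name target → Spec_normalize_match name target (normalize_match name target)

-- ===== LEMMAS AND PROOFS =====

def pvAllNames : List String :=
  ["bench press", "bench", "flat bench", "incline bench", "decline bench press",
   "squat", "barbell squat", "barbell back squat", "back squat",
   "ohp", "overhead press", "standing press", "military press",
   "seated cable row", "seated row", "cable row",
   "barbell row", "bent over row", "pendlay row"]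

set_option maxHeartbeats 1000000 in
theorem pv_get?_none (x : String) (h : x ∉ pvAllNames) : pvGroup.get? x = none := by
  unfold pvGroup
  rw [PySem.Dict.get?_mk_cons, PySem.Dict.get?_mk_cons, PySem.Dict.get?_mk_cons,
    PySem.Dict.get?_mk_cons, PySem.Dict.get?_mk_cons, PySem.Dict.get?_mk_cons,
    PySem.Dict.get?_mk_cons, PySem.Dict.get?_mk_cons, PySem.Dict.get?_mk_cons,
    PySem.Dict.get?_mk_cons, PySem.Dict.get?_mk_cons, PySem.Dict.get?_mk_cons,
    PySem.Dict.get?_mk_cons, PySem.Dict.get?_mk_cons, PySem.Dict.get?_mk_cons,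
    PySem.Dict.get?_mk_cons, PySem.Dict.get?_mk_cons, PySem.Dict.get?_mk_cons,
    PySem.Dict.get?_mk_cons]
  have n1 : ¬((("bench press":String) == x) = true) := fun hc => h (eq_of_beq hc ▸ (by decide : ("bench press":String) ∈ pvAllNames))
  have n2 : ¬((("bench":String) == x) = true) := fun hc => h (eq_of_beq hc ▸ (by decide : ("bench":String) ∈ pvAllNames))
  have n3 : ¬((("flat bench":String) == x) = true) := fun hc => h (eq_of_beq hc ▸ (by decide : ("flat bench":String) ∈ pvAllNames))
  have n4 : ¬((("incline bench":String) == x) = true) := fun hc => h (eq_of_beq hc ▸ (by decide : ("incline bench":String) ∈ pvAllNames))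
  have n5 : ¬((("decline bench press":String) == x) = true) := fun hc => h (eq_of_beq hc ▸ (by decide : ("decline bench press":String) ∈ pvAllNames))
  have n6 : ¬((("squat":String) == x) = true) := fun hc => h (eq_of_beq hc ▸ (by decide : ("squat":String) ∈ pvAllNames))
  have n7 : ¬((("barbell squat":String) == x) = true) := fun hc => h (eq_of_beq hc ▸ (by decide : ("barbell squat":String) ∈ pvAllNames))
  have n8 : ¬((("barbell back squat":String) == x) = true) := fun hc => h (eq_of_beq hc ▸ (by decide : ("barbell back squat":String) ∈ pvAllNames))
  have n9 : ¬((("back squat":String) == x) = true) := fun hc => h (eq_of_beq hc ▸ (by decide : ("back squat":String) ∈ pvAllNames))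
  have n10 : ¬((("ohp":String) == x) = true) := fun hc => h (eq_of_beq hc ▸ (by decide : ("ohp":String) ∈ pvAllNames))
  have n11 : ¬((("overhead press":String) == x) = true) := fun hc => h (eq_of_beq hc ▸ (by decide : ("overhead press":String) ∈ pvAllNames))
  have n12 : ¬((("standing press":String) == x) = true) := fun hc => h (eq_of_beq hc ▸ (by decide : ("standing press":String) ∈ pvAllNames))
  have n13 : ¬((("military press":String) == x) = true) := fun hc => h (eq_of_beq hc ▸ (by decide : ("military press":String) ∈ pvAllNames))
  have n14 : ¬((("seated cable row":String) == x) = true) := fun hc => h (eq_of_beq hc ▸ (by decide : ("seated cable row":String) ∈ pvAllNames))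
  have n15 : ¬((("seated row":String) == x) = true) := fun hc => h (eq_of_beq hc ▸ (by decide : ("seated row":String) ∈ pvAllNames))
  have n16 : ¬((("cable row":String) == x) = true) := fun hc => h (eq_of_beq hc ▸ (by decide : ("cable row":String) ∈ pvAllNames))
  have n17 : ¬((("barbell row":String) == x) = true) := fun hc => h (eq_of_beq hc ▸ (by decide : ("barbell row":String) ∈ pvAllNames))
  have n18 : ¬((("bent over row":String) == x) = true) := fun hc => h (eq_of_beq hc ▸ (by decide : ("bent over row":String) ∈ pvAllNames))
  have n19 : ¬((("pendlay row":String) == x) = true) := fun hc => h (eq_of_beq hc ▸ (by decide : ("pendlay row":String) ∈ pvAllNames))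
  rw [if_neg n1, if_neg n2, if_neg n3, if_neg n4, if_neg n5, if_neg n6, if_neg n7, if_neg n8, if_neg n9, if_neg n10, if_neg n11, if_neg n12, if_neg n13, if_neg n14, if_neg n15, if_neg n16, if_neg n17, if_neg n18, if_neg n19]
  rfl

set_option maxHeartbeats 1000000 in
theorem pv_contains_false (x : String) (h : x ∉ pvAllNames) : pvGroup.contains x = false := by
  rw [PySem.Dict.contains_eq_isSome_get?, pv_get?_none x h]; rfl

set_option maxHeartbeats 1000000 in
theorem pv_any_false_left (tl nl : String) (h : tl ∉ pvAllNames) :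
    (pvAliasesA.any (fun p =>
      let all_names := p.1 :: p.2
      all_names.contains tl && all_names.contains nl)) = false := by
  rw [List.any_eq_false]
  intro p hp
  fin_cases hp <;> simp_all [pvAllNames]

set_option maxHeartbeats 1000000 in
theorem pv_any_false_right (tl nl : String) (h : nl ∉ pvAllNames) :
    (pvAliasesA.any (fun p =>
      let all_names := p.1 :: p.2
      all_names.contains tl && all_names.contains nl)) = false := by
  rw [List.any_eq_false]
  intro p hp
  fin_cases hp <;> simp_all [pvAllNames]

set_option maxHeartbeats 2000000 in
theorem pv_alias_eq (nl tl : String) :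
    (pvAliasesA.any (fun p =>
      let all_names := p.1 :: p.2
      all_names.contains tl && all_names.contains nl))
    = (pvGroup.contains nl && (pvGroup.get? nl == pvGroup.get? tl)) := by
  by_cases hn : nl ∈ pvAllNames
  · by_cases ht : tl ∈ pvAllNames
    · simp only [pvAllNames, List.mem_cons, List.not_mem_nil, or_false] at hn ht
      rcases hn with rfl|rfl|rfl|rfl|rfl|rfl|rfl|rfl|rfl|rfl|rfl|rfl|rfl|rfl|rfl|rfl|rfl|rfl|rfl <;>
      rcases ht with rfl|rfl|rfl|rfl|rfl|rfl|rfl|rfl|rfl|rfl|rfl|rfl|rfl|rfl|rfl|rfl|rfl|rfl|rfl <;>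
      decide
    · rw [pv_any_false_left tl nl ht, pv_get?_none tl ht]
      cases hq : pvGroup.get? nl <;>
        simp [PySem.Dict.contains_eq_isSome_get?, hq]
  · rw [pv_any_false_right tl nl hn, pv_contains_false nl hn]
    simp

theorem pv_bool_shape (a b c : Bool) (d e : Bool) (h : d = e) :
    (if a && !b then false else if b && !a then false else if c then true else d)
    = ((a == b) && (c || e)) := by
  subst h; revert a b c; cases d <;> decide

-- ===== VERDICT (by name: the statement is the Claim_ definition above) =====
theorem normalize_match_spec : Claim_equal_normalize_match := by
  intro name target _
  exact pv_bool_shape _ _ _ _ _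
    (pv_alias_eq (PySem.Str.lower name) (PySem.Str.lower target))
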